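-- pv_equiv track=rewrite | github.com/AngelAlonsoRamirez/Discord-AI | bot.py | infer_relationship_notes
-- ===== SOURCE A (Python) =====
-- def merge_notes(old_text, new_text, limit=8):
--
--
--     """Fusiona notas antiguas y nuevas sin duplicados, manteniendo un máximo de elementos para que los perfiles no crezcan sin control."""
--     old_parts = [x.strip() for x in (old_text or "").split(",") if x.strip()]
--     new_parts = [x.strip() for x in (new_text or "").split(",") if x.strip()]
--     merged = []
--     for item in old_parts + new_parts:
--         if item and item not in merged:
--             merged.append(item)
--     return ", ".join(merged[:limit])
--
-- def infer_relationship_notes(content):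
--
--
--     """Genera notas de relación entre el usuario y el bot según patrones del mensaje: saludos, humor, ayuda, salseo o gaming."""
--     lower = content.lower()
--     notes = ""
--     if any(x in lower for x in ["hola", "buenas", "ey", "hey"]):
--         notes = merge_notes(notes, "saluda con naturalidad")
--     if any(x in lower for x in ["jaja", "xd", "ajaj"]):
--         notes = merge_notes(notes, "tiene humor")
--     if any(x in lower for x in ["ayuda", "error", "no va", "fallo"]):
--         notes = merge_notes(notes, "a veces viene buscando ayuda")
--     if any(x in lower for x in ["chisme", "salseo", "cuento", "cotilleo"]):
--         notes = merge_notes(notes, "le gusta el salseo")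
--     if any(x in lower for x in ["juego", "videojuego", "gta", "minecraft", "fortnite"]):
--         notes = merge_notes(notes, "le tira bastante al tema gamer")
--     return notes
-- ===== SOURCE B (Python) =====
-- _TABLE = [
--     (["hola", "buenas", "ey", "hey"], "saluda con naturalidad"),
--     (["jaja", "xd", "ajaj"], "tiene humor"),
--     (["ayuda", "error", "no va", "fallo"], "a veces viene buscando ayuda"),
--     (["chisme", "salseo", "cuento", "cotilleo"], "le gusta el salseo"),
--     (["juego", "videojuego", "gta", "minecraft", "fortnite"], "le tira bastante al tema gamer"),
-- ]
--
--
-- def infer_relationship_notes(content):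
--     lower = content.lower()
--     return ", ".join(note for keywords, note in _TABLE
--                      if any(k in lower for k in keywords))
-- ===== Notes on version B (the rewrite author's own statement) =====
-- stated objective: idiomatic
-- what changed: Replaces five branch-plus-merge_notes (split/strip/dedup/rejoin) round-trips over a growing string with one data-driven pass over a fixed (keywords, note) table joined once; merge_notes is gone entirely.
import Mathlib
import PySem

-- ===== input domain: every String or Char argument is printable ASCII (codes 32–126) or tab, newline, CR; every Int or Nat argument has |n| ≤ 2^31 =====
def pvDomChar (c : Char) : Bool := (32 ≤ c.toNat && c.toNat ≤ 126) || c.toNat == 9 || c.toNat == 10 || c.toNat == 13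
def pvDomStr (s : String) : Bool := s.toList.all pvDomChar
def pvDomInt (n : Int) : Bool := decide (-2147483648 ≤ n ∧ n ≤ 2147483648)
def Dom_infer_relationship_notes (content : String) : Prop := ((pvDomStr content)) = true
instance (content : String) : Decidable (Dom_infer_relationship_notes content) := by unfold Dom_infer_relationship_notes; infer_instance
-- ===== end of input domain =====

-- B replaces A's five branch-plus-merge_notes round-trips with one pass over a fixed
-- (keywords, note) table joined once (idiomatic; return value proved equal on Dom).

-- ===== PORT A =====
def merge_notes (old_text new_text : String) (limit : Int) : String :=
  let old_parts := (((PySem.Str.split? (if old_text == "" then "" else old_text) ",").getD []).map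
      PySem.Str.strip).filter (fun x => x ≠ "")
  let new_parts := (((PySem.Str.split? (if new_text == "" then "" else new_text) ",").getD []).map
      PySem.Str.strip).filter (fun x => x ≠ "")
  let merged := (old_parts ++ new_parts).foldl
      (fun merged item => if item ≠ "" ∧ item ∉ merged then merged ++ [item] else merged) []
  PySem.Str.join ", " (PySem.List.slice merged none (some limit))

def infer_relationship_notes (content : String) : String :=
  let lower := PySem.Str.lower content
  let notes := ""
  let notes := if (["hola", "buenas", "ey", "hey"] : List String).any (fun x => PySem.Str.isIn x lower)
    then merge_notes notes "saluda con naturalidad" 8 else notes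
  let notes := if (["jaja", "xd", "ajaj"] : List String).any (fun x => PySem.Str.isIn x lower)
    then merge_notes notes "tiene humor" 8 else notes
  let notes := if (["ayuda", "error", "no va", "fallo"] : List String).any (fun x => PySem.Str.isIn x lower)
    then merge_notes notes "a veces viene buscando ayuda" 8 else notes
  let notes := if (["chisme", "salseo", "cuento", "cotilleo"] : List String).any (fun x => PySem.Str.isIn x lower)
    then merge_notes notes "le gusta el salseo" 8 else notes
  let notes := if (["juego", "videojuego", "gta", "minecraft", "fortnite"] : List String).any (fun x => PySem.Str.isIn x lower)
    then merge_notes notes "le tira bastante al tema gamer" 8 else notes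
  notes

-- ===== PORT B =====
def pvTable : List (List String × String) :=
  [(["hola", "buenas", "ey", "hey"], "saluda con naturalidad"),
   (["jaja", "xd", "ajaj"], "tiene humor"),
   (["ayuda", "error", "no va", "fallo"], "a veces viene buscando ayuda"),
   (["chisme", "salseo", "cuento", "cotilleo"], "le gusta el salseo"),
   (["juego", "videojuego", "gta", "minecraft", "fortnite"], "le tira bastante al tema gamer")]

def infer_relationship_notes_alt (content : String) : String :=
  let lower := PySem.Str.lower content
  PySem.Str.join ", "
    ((pvTable.filter (fun p => p.1.any (fun x => PySem.Str.isIn x lower))).map (fun p => p.2))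

-- ===== PRECONDITION & SPEC =====
def Spec_infer_relationship_notes (content : String) (out : String) : Prop := out = infer_relationship_notes_alt content
instance (content : String) (out : String) : Decidable (Spec_infer_relationship_notes content out) := by unfold Spec_infer_relationship_notes; infer_instance

-- ===== CLAIM (what is proved, stated in full; the proofs are below) =====
def Claim_equal_infer_relationship_notes : Prop := ∀ (content : String), Dom_infer_relationship_notes content → Spec_infer_relationship_notes content (infer_relationship_notes content)

-- ===== LEMMAS AND PROOFS =====

-- ===== VERDICT (by name: the statement is the Claim_ definition above) =====
set_option maxRecDepth 8192 in
set_option maxHeartbeats 2000000 in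
theorem infer_relationship_notes_spec : Claim_equal_infer_relationship_notes := by
  intro content _
  unfold Spec_infer_relationship_notes
  show infer_relationship_notes content = infer_relationship_notes_alt content
  unfold infer_relationship_notes infer_relationship_notes_alt pvTable
  simp only []
  set L := PySem.Str.lower content with hL
  by_cases h1 : (["hola", "buenas", "ey", "hey"] : List String).any (fun x => PySem.Str.isIn x L) = true <;>
  by_cases h2 : (["jaja", "xd", "ajaj"] : List String).any (fun x => PySem.Str.isIn x L) = true <;>
  by_cases h3 : (["ayuda", "error", "no va", "fallo"] : List String).any (fun x => PySem.Str.isIn x L) = true <;>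
  by_cases h4 : (["chisme", "salseo", "cuento", "cotilleo"] : List String).any (fun x => PySem.Str.isIn x L) = true <;>
  by_cases h5 : (["juego", "videojuego", "gta", "minecraft", "fortnite"] : List String).any (fun x => PySem.Str.isIn x L) = true <;>
  simp only [List.filter, h1, h2, h3, h4, h5, if_pos, if_neg, Bool.false_eq_true,
    not_false_eq_true, List.map] <;> decide
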